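-- pv_equiv track=rewrite | github.com/kaichimomose/Advanced-Data-Structures | source/autocomplete.py | find_all_words
-- ===== SOURCE A (Python) =====
-- def find_all_words(list_, item, middle):
--     predicted_words = [list_[middle]]
--     item_length = len(item)
--     left_match = True
--     right_match = True
--     left_index = middle
--     right_index = middle
--     while left_match:
--         left_index -= 1
--         if left_index < 0:
--             left_match = False
--         else:
--             word = list_[left_index]
--             if word[:item_length].lower() == item.lower():
--                 predicted_words.append(word)
--             else:
--                 left_match = False
--     while right_match:
--         right_index += 1
--         if right_index >= len(list_):
--             right_match = False
--         else:
--             word = list_[right_index]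
--             if word[:item_length].lower() == item.lower():
--                 predicted_words.append(word)
--             else:
--                 right_match = False
--     return predicted_words
-- ===== SOURCE B (Python) =====
-- def find_all_words(list_, item, middle):
--     target = item.lower()
--     n = len(item)
--     bad = [i for i, w in enumerate(list_) if w[:n].lower() != target]
--     lo = max((i for i in bad if i < middle), default=-1)
--     hi = min((i for i in bad if i > middle), default=len(list_))
--     return [list_[middle]] + list_[lo + 1:middle][::-1] + list_[middle + 1:hi]
-- ===== Notes on version B (the rewrite author's own statement) =====
-- stated objective: alternative
-- what changed: B makes one full pass computing the list of non-matching indices, takes the nearest such index on each side of middle (max below, min above, with defaults -1/len), and builds the result by slicing and reversing, instead of A's two outward-expanding while-loops with index counters and boolean flags.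
-- outside the precondition, e.g. on find_all_words(['', 'a'], 'ab', -1): A returns ['a'], B returns ['a', '']; on find_all_words(['apple'], 'ap', 3): A raises IndexError, B raises IndexError
import Mathlib
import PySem

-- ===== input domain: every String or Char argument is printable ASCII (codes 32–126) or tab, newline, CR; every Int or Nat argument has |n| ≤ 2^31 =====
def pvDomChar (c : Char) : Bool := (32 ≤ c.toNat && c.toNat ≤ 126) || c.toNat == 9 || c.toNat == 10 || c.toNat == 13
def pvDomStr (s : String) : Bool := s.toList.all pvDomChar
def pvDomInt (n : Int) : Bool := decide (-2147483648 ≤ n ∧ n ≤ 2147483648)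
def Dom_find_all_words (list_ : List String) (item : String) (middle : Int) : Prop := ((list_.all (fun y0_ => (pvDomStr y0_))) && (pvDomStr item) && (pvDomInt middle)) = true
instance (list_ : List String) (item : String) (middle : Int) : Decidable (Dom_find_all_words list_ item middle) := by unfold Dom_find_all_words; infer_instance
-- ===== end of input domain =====

-- B replaces A's two outward-expanding while-loops (index counters + boolean flags) by one
-- full pass collecting the non-matching indices, nearest-mismatch boundaries around middle
-- (max below / min above, defaults -1 / len), and slice-based result assembly; same return
-- value on Pre_.

-- ===== PORT A =====
-- the prefix test A performs each iteration: word[:len(item)].lower() == item.lower()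
def pvMatchA (item : String) (word : String) : Bool :=
  PySem.Str.lower (PySem.Str.slice word none (some (PySem.Str.len item))) == PySem.Str.lower item

-- the first while loop: left_index decreases from middle; the `none` branch of pyGet?
-- is a totality guard only (inside Pre_ every visited index is in range)
def pvLeftLoop (list_ : List String) (item : String) (leftIndex : Int) (acc : List String) : List String :=
  if _h : leftIndex - 1 < 0 then acc
  else
    match PySem.List.pyGet? list_ (leftIndex - 1) with
    | none => acc
    | some word =>
        if pvMatchA item word then pvLeftLoop list_ item (leftIndex - 1) (acc ++ [word])
        else acc
termination_by leftIndex.toNat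
decreasing_by omega

-- the second while loop: right_index increases from middle up to len(list_)
def pvRightLoop (list_ : List String) (item : String) (rightIndex : Int) (acc : List String) : List String :=
  if _h : rightIndex + 1 ≥ (list_.length : Int) then acc
  else
    match PySem.List.pyGet? list_ (rightIndex + 1) with
    | none => acc
    | some word =>
        if pvMatchA item word then pvRightLoop list_ item (rightIndex + 1) (acc ++ [word])
        else acc
termination_by ((list_.length : Int) - rightIndex).toNat
decreasing_by omega

def find_all_words (list_ : List String) (item : String) (middle : Int) : List String :=
  -- predicted_words = [list_[middle]]  (inside Pre_ the index is in range; getD is a totality guard)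
  let predicted_words := [(PySem.List.pyGet? list_ middle).getD ""]
  let afterLeft := pvLeftLoop list_ item middle predicted_words
  pvRightLoop list_ item middle afterLeft

-- ===== PORT B =====
def find_all_words_alt (list_ : List String) (item : String) (middle : Int) : List String :=
  let target := PySem.Str.lower item
  let n := PySem.Str.len item
  -- bad = [i for i, w in enumerate(list_) if w[:n].lower() != target]
  let bad := ((PySem.List.enumerate list_ 0).filter
      (fun iw => !(PySem.Str.lower (PySem.Str.slice iw.2 none (some n)) == target))).map (·.1)
  -- lo = max((i for i in bad if i < middle), default=-1)
  let lo := PySem.List.maxD (bad.filter (fun i => i < middle)) (fun x => x) (-1)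
  -- hi = min((i for i in bad if i > middle), default=len(list_))
  let hi := PySem.List.minD (bad.filter (fun i => middle < i)) (fun x => x) ((list_.length : Int))
  -- [list_[middle]] + list_[lo+1:middle][::-1] + list_[middle+1:hi]  (getD: totality guard, in range inside Pre_)
  [(PySem.List.pyGet? list_ middle).getD ""]
    ++ (PySem.List.slice list_ (some (lo + 1)) (some middle)).reverse
    ++ PySem.List.slice list_ (some (middle + 1)) (some hi)

-- ===== PRECONDITION & SPEC =====
-- Pre_ restricts middle to the function's natural domain: a valid non-negative index
-- (the caller passes an index found by binary search). For -len ≤ middle < 0 Python's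
-- negative-index wraparound makes A return a value whose leftward scan stops at once
-- while the rightward scan restarts at index 0 — an accident of the implementation,
-- excluded here; for middle outside [-len, len) A raises IndexError.
def Pre_find_all_words (list_ : List String) (item : String) (middle : Int) : Prop :=
  0 ≤ middle ∧ middle < (list_.length : Int)
instance (list_ : List String) (item : String) (middle : Int) : Decidable (Pre_find_all_words list_ item middle) := by
  unfold Pre_find_all_words; infer_instance

def pvWitness_find_all_words : List String × String × Int := (["apple", "apricot", "banana"], "ap", 1)

def Spec_find_all_words (list_ : List String) (item : String) (middle : Int) (out : List String) : Prop := out = find_all_words_alt list_ item middle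
instance (list_ : List String) (item : String) (middle : Int) (out : List String) : Decidable (Spec_find_all_words list_ item middle out) := by unfold Spec_find_all_words; infer_instance

-- ===== CLAIM (what is proved, stated in full; the proofs are below) =====
def Claim_equal_find_all_words : Prop := ∀ (list_ : List String) (item : String) (middle : Int), Dom_find_all_words list_ item middle → Pre_find_all_words list_ item middle → Spec_find_all_words list_ item middle (find_all_words list_ item middle)

-- ===== LEMMAS AND PROOFS =====

-- maxD/minD are the getD of max?/min? (bridge to max?_isMax / min?_isMin)
lemma pvMaxD_eq {α κ : Type} [LT κ] [DecidableLT κ] (xs : List α) (key : α → κ) (d : α) :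
    PySem.List.maxD xs key d = (PySem.List.max? xs key).getD d := by
  cases xs <;> rfl

lemma pvMinD_eq {α κ : Type} [LT κ] [DecidableLT κ] (xs : List α) (key : α → κ) (d : α) :
    PySem.List.minD xs key d = (PySem.List.min? xs key).getD d := by
  cases xs <;> rfl

-- proof-side helper: the common take-while shape both programs' parts reduce to
def pvTakeWhile (p : String → Bool) : List String → List String
  | [] => []
  | w :: ws => if p w then w :: pvTakeWhile p ws else []

-- A's left loop from index k collects, after acc, exactly the take-while of the reversed prefix
lemma pvLeftLoop_eq (list_ : List String) (item : String) :
    ∀ (k : Nat) (acc : List String), k ≤ list_.length →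
      pvLeftLoop list_ item (k : Int) acc = acc ++ pvTakeWhile (pvMatchA item) (list_.take k).reverse := by
  intro k
  induction k with
  | zero => intro acc _; rw [pvLeftLoop]; simp [pvTakeWhile]
  | succ k ih =>
      intro acc hk
      have hklen : k < list_.length := by omega
      rw [pvLeftLoop]
      have h1 : ¬ ((k + 1 : Nat) : Int) - 1 < 0 := by omega
      have h2 : ((k + 1 : Nat) : Int) - 1 = (k : Int) := by push_cast; ring
      rw [dif_neg h1, h2]
      have hget : PySem.List.pyGet? list_ (k : Int) = some list_[k] := by
        simp [PySem.List.pyGet?_natCast, List.getElem?_eq_getElem hklen]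
      rw [hget]
      have htake : (list_.take (k + 1)).reverse = list_[k] :: (list_.take k).reverse := by
        rw [List.take_add_one, List.getElem?_eq_getElem hklen]
        simp
      rw [htake]
      by_cases hm : pvMatchA item list_[k]
      · simp only [hm, if_true, pvTakeWhile]
        rw [ih (acc ++ [list_[k]]) (by omega)]
        simp
      · simp [hm, pvTakeWhile]

-- A's right loop from index j collects, after acc, exactly the take-while of the suffix after j
lemma pvRightLoop_eq (list_ : List String) (item : String) :
    ∀ (n j : Nat) (acc : List String), list_.length - j ≤ n →
      pvRightLoop list_ item (j : Int) acc = acc ++ pvTakeWhile (pvMatchA item) (list_.drop (j + 1)) := by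
  intro n
  induction n with
  | zero =>
      intro j acc hn
      rw [pvRightLoop]
      have h1 : (j : Int) + 1 ≥ (list_.length : Int) := by omega
      rw [dif_pos h1]
      have : list_.drop (j + 1) = [] := by
        apply List.drop_eq_nil_of_le; omega
      simp [this, pvTakeWhile]
  | succ n ih =>
      intro j acc hn
      rw [pvRightLoop]
      by_cases h1 : (j : Int) + 1 ≥ (list_.length : Int)
      · rw [dif_pos h1]
        have : list_.drop (j + 1) = [] := by
          apply List.drop_eq_nil_of_le; omega
        simp [this, pvTakeWhile]
      · rw [dif_neg h1]
        have hjlen : j + 1 < list_.length := by omega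
        have h2 : (j : Int) + 1 = ((j + 1 : Nat) : Int) := by push_cast; ring
        rw [h2]
        have hget : PySem.List.pyGet? list_ ((j + 1 : Nat) : Int) = some list_[j + 1] := by
          rw [PySem.List.pyGet?_natCast, List.getElem?_eq_getElem hjlen]
        rw [hget]
        have hdrop : list_.drop (j + 1) = list_[j + 1] :: list_.drop (j + 2) := by
          rw [List.drop_eq_getElem_cons hjlen]
        by_cases hm : pvMatchA item list_[j + 1]
        · simp only [hm, if_true]
          rw [ih (j + 1) (acc ++ [list_[j + 1]]) (by omega)]
          rw [hdrop]
          simp [pvTakeWhile, hm]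
        · rw [hdrop]
          simp [pvTakeWhile, hm]

-- take-while of a list all of whose first m elements match, stopping at m, is take m
lemma pvTakeWhile_eq_take (p : String → Bool) :
    ∀ (xs : List String) (m : Nat), m ≤ xs.length →
      (∀ i (h : i < xs.length), i < m → p xs[i]) →
      (m = xs.length ∨ ∃ h : m < xs.length, ¬ p xs[m]) →
      pvTakeWhile p xs = xs.take m := by
  intro xs
  induction xs with
  | nil => intro m _ _ _; simp [pvTakeWhile]
  | cons x xs ih =>
      intro m hm hall hstop
      match m with
      | 0 =>
          have hx : ¬ p x := by
            rcases hstop with h | ⟨h, hx⟩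
            · simp at h
            · exact hx
          simp [pvTakeWhile, hx]
      | m + 1 =>
          have hx : p x := hall 0 (by simp) (by omega)
          simp only [pvTakeWhile, hx, if_true, List.take_succ_cons]
          congr 1
          apply ih m (by simpa using hm)
          · intro i hi him
            have := hall (i + 1) (by simpa using hi) (by omega)
            simpa using this
          · rcases hstop with h | ⟨h, hxm⟩
            · left; simpa using h
            · right; exact ⟨by simpa using h, by simpa using hxm⟩

-- take-while of a reversed list whose elements from j on all match, with a mismatch at j-1
lemma pvTakeWhile_reverse_eq (p : String → Bool) (xs : List String) (j : Nat)
    (hj : j ≤ xs.length)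
    (hall : ∀ i (h : i < xs.length), j ≤ i → p xs[i])
    (hstop : j = 0 ∨ ∃ h : j - 1 < xs.length, ¬ p xs[j - 1]) :
    pvTakeWhile p xs.reverse = (xs.drop j).reverse := by
  have hlen : xs.reverse.length = xs.length := by simp
  have h1 : pvTakeWhile p xs.reverse = xs.reverse.take (xs.length - j) := by
    apply pvTakeWhile_eq_take p xs.reverse (xs.length - j) (by omega)
    · intro i hi him
      rw [List.getElem_reverse]
      apply hall
      omega
    · by_cases hj0 : j = 0
      · left; omega
      · right
        refine ⟨by omega, ?_⟩
        have : xs.reverse[xs.length - j]'(by omega) = xs[j - 1]'(by omega) := by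
          rw [List.getElem_reverse]
          congr 1
          omega
        rw [this]
        rcases hstop with h | ⟨h, hx⟩
        · omega
        · exact hx
  rw [h1, List.reverse_drop]

-- ===== VERDICT (by name: the statement is the Claim_ definition above) =====
theorem find_all_words_spec : Claim_equal_find_all_words := by
  intro list_ item middle _hdom hpre
  obtain ⟨h0, hlt⟩ := hpre
  unfold Spec_find_all_words
  unfold find_all_words find_all_words_alt
  dsimp only
  set p := pvMatchA item with hp
  set first := (PySem.List.pyGet? list_ middle).getD "" with hfirst
  obtain ⟨k, rfl⟩ : ∃ k : Nat, middle = (k : Int) := ⟨middle.toNat, (Int.toNat_of_nonneg h0).symm⟩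
  have hk : k < list_.length := by exact_mod_cast hlt
  -- the filter predicate of `bad` IS the match test's negation
  have hpred : (fun iw : Int × String =>
      !(PySem.Str.lower (PySem.Str.slice iw.2 none (some (PySem.Str.len item))) == PySem.Str.lower item))
      = (fun iw : Int × String => ! p iw.2) := rfl
  rw [hpred]
  set bad := ((PySem.List.enumerate list_ 0).filter (fun iw => ! p iw.2)).map (·.1) with hbad
  -- membership in bad ↔ a non-matching index
  have hmem : ∀ x : Int, x ∈ bad ↔ ∃ (j : Nat) (h : j < list_.length), x = (j : Int) ∧ ¬ p list_[j] := by
    intro x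
    rw [hbad]
    simp only [List.mem_map, List.mem_filter, PySem.List.mem_enumerate_iff]
    constructor
    · rintro ⟨⟨i, w⟩, ⟨⟨j, hjl, hjw⟩, hpw⟩, hx⟩
      obtain ⟨h1, h2⟩ := Prod.mk.injEq .. ▸ hjw
      refine ⟨j, hjl, ?_, ?_⟩
      · simp at hx h1; omega
      · rw [h2] at hpw
        simp at hpw
        simp [hpw]
    · rintro ⟨j, hjl, hx, hpj⟩
      exact ⟨((j : Int), list_[j]), ⟨⟨j, hjl, by simp⟩, by simpa using hpj⟩, by simpa using hx.symm⟩
  set bl := bad.filter (fun i => decide (i < (k : Int))) with hbl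
  set br := bad.filter (fun i => decide ((k : Int) < i)) with hbr
  set lo := PySem.List.maxD bl (fun x => x) (-1) with hlo
  set hi := PySem.List.minD br (fun x => x) ((list_.length : Int)) with hhi
  -- properties of lo
  have hblmem : ∀ x : Int, x ∈ bl ↔ ∃ (j : Nat) (h : j < list_.length), x = (j : Int) ∧ ¬ p list_[j] ∧ j < k := by
    intro x
    rw [hbl, List.mem_filter]
    rw [hmem x]
    constructor
    · rintro ⟨⟨j, hjl, hx, hpj⟩, hxk⟩
      exact ⟨j, hjl, hx, hpj, by rw [hx] at hxk; simpa using hxk⟩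
    · rintro ⟨j, hjl, hx, hpj, hjk⟩
      exact ⟨⟨j, hjl, hx, hpj⟩, by rw [hx]; simpa using hjk⟩
  have hlo_bounds : -1 ≤ lo ∧ lo < (k : Int) := by
    by_cases hne' : bl = []
    · rw [hlo, hne', PySem.List.maxD_nil]; omega
    · have := PySem.List.maxD_mem bl (fun x => x) (-1) hne'
      rw [← hlo] at this
      rw [hblmem lo] at this
      obtain ⟨j, hjl, hx, _, hjk⟩ := this
      omega
  have hlo_max : ∀ y ∈ bl, y ≤ lo := by
    intro y hy
    have hne : bl ≠ [] := by intro h; rw [h] at hy; simp at hy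
    have hm' : PySem.List.max? bl (fun x => x) ≠ none := by
      rw [Ne, PySem.List.max?_eq_none_iff]; exact hne
    obtain ⟨m, hm⟩ := Option.ne_none_iff_exists'.mp hm'
    have hmd : lo = m := by rw [hlo, pvMaxD_eq, hm]; rfl
    rw [hmd]
    exact PySem.List.max?_isMax hm y hy
  have hlo_all : ∀ i : Nat, (h : i < list_.length) → i < k → lo < (i : Int) → p list_[i] := by
    intro i hil hik hloi
    by_contra hpi
    have : (i : Int) ∈ bl := (hblmem (i : Int)).mpr ⟨i, hil, rfl, hpi, hik⟩
    have := hlo_max _ this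
    omega
  have hlo_stop : lo = -1 ∨ ∃ (j : Nat) (h : j < list_.length), lo = (j : Int) ∧ ¬ p list_[j] := by
    by_cases hne' : bl = []
    · left; rw [hlo, hne', PySem.List.maxD_nil]
    · have := PySem.List.maxD_mem bl (fun x => x) (-1) hne'
      rw [← hlo, hblmem lo] at this
      obtain ⟨j, hjl, hx, hpj, _⟩ := this
      right; exact ⟨j, hjl, hx, hpj⟩
  -- properties of hi
  have hbrmem : ∀ x : Int, x ∈ br ↔ ∃ (j : Nat) (h : j < list_.length), x = (j : Int) ∧ ¬ p list_[j] ∧ k < j := by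
    intro x
    rw [hbr, List.mem_filter, hmem x]
    constructor
    · rintro ⟨⟨j, hjl, hx, hpj⟩, hxk⟩
      exact ⟨j, hjl, hx, hpj, by rw [hx] at hxk; simpa using hxk⟩
    · rintro ⟨j, hjl, hx, hpj, hjk⟩
      exact ⟨⟨j, hjl, hx, hpj⟩, by rw [hx]; simpa using hjk⟩
  have hhi_bounds : (k : Int) < hi ∧ hi ≤ (list_.length : Int) := by
    by_cases hne' : br = []
    · rw [hhi, hne', PySem.List.minD_nil]; omega
    · have := PySem.List.minD_mem br (fun x => x) ((list_.length : Int)) hne'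
      rw [← hhi, hbrmem hi] at this
      obtain ⟨j, hjl, hx, _, hjk⟩ := this
      omega
  have hhi_min : ∀ y ∈ br, hi ≤ y := by
    intro y hy
    have hne : br ≠ [] := by intro h; rw [h] at hy; simp at hy
    have hm' : PySem.List.min? br (fun x => x) ≠ none := by
      rw [Ne, PySem.List.min?_eq_none_iff]; exact hne
    obtain ⟨m, hm⟩ := Option.ne_none_iff_exists'.mp hm'
    have hmd : hi = m := by rw [hhi, pvMinD_eq, hm]; rfl
    rw [hmd]
    exact PySem.List.min?_isMin hm y hy
  have hhi_all : ∀ i : Nat, (h : i < list_.length) → k < i → (i : Int) < hi → p list_[i] := by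
    intro i hil hik hihi
    by_contra hpi
    have : (i : Int) ∈ br := (hbrmem (i : Int)).mpr ⟨i, hil, rfl, hpi, hik⟩
    have := hhi_min _ this
    omega
  have hhi_stop : hi = (list_.length : Int) ∨ ∃ (j : Nat) (h : j < list_.length), hi = (j : Int) ∧ ¬ p list_[j] := by
    by_cases hne' : br = []
    · left; rw [hhi, hne', PySem.List.minD_nil]
    · have := PySem.List.minD_mem br (fun x => x) ((list_.length : Int)) hne'
      rw [← hhi, hbrmem hi] at this
      obtain ⟨j, hjl, hx, hpj, _⟩ := this
      right; exact ⟨j, hjl, hx, hpj⟩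
  -- A's value
  rw [pvLeftLoop_eq list_ item k [first] (by omega)]
  rw [pvRightLoop_eq list_ item list_.length k _ (by omega)]
  -- left part: take-while over the reversed prefix = reverse of the slice list_[lo+1:k]
  have hlo0 : 0 ≤ lo + 1 := by omega
  set a := (lo + 1).toNat with ha
  have hak : a ≤ k := by omega
  have hleft : pvTakeWhile p (list_.take k).reverse = (PySem.List.slice list_ (some (lo + 1)) (some (k : Int))).reverse := by
    rw [PySem.List.slice_toNat list_ hlo0 (by omega)]
    rw [Int.toNat_natCast, ← ha]
    have hdt : (List.take k list_).drop a = (list_.drop a).take (k - a) := by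
      rw [List.drop_take]
    rw [← hdt]
    apply pvTakeWhile_reverse_eq p (list_.take k) a
    · simp; omega
    · intro i hi hai
      have hil : i < list_.length := by simp at hi; omega
      rw [List.getElem_take]
      apply hlo_all i hil (by simp at hi; omega)
      omega
    · by_cases ha0 : a = 0
      · left; exact ha0
      · right
        refine ⟨by simp; omega, ?_⟩
        rcases hlo_stop with h | ⟨j, hjl, hlj, hpj⟩
        · omega
        · simp only [List.getElem_take]
          have hja : a - 1 = j := by omega
          simp only [hja]
          exact hpj
  -- right part: take-while over the suffix = slice list_[k+1:hi]
  have hright : pvTakeWhile p (list_.drop (k + 1)) = PySem.List.slice list_ (some ((k : Int) + 1)) (some hi) := by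
    rw [PySem.List.slice_toNat list_ (by omega) (by omega)]
    have h1 : ((k : Int) + 1).toNat = k + 1 := by omega
    rw [h1]
    apply pvTakeWhile_eq_take p (list_.drop (k + 1)) (hi.toNat - (k + 1))
    · simp; omega
    · intro i hi2 him
      rw [List.getElem_drop]
      apply hhi_all (k + 1 + i) (by simp at hi2; omega) (by omega)
      omega
    · rcases hhi_stop with h | ⟨j, hjl, hjx, hpj⟩
      · left; simp; omega
      · right
        refine ⟨by simp; omega, ?_⟩
        simp only [List.getElem_drop]
        have hje : k + 1 + (hi.toNat - (k + 1)) = j := by omega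
        simp only [hje]
        exact hpj
  rw [hleft, hright, List.append_assoc]
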